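-- pv_equiv track=rewrite | github.com/AnMunSR/StudyPython | BaiTapXuLyList/Bai57.py | timGiaTriAmLonNhat
-- ===== SOURCE A (Python) =====
-- def timGiaTriAmLonNhat(L):
--     temp = 0
--     for i in range(0, len(L)):
--         if temp == 0:
--             if L[i] < temp:
--                 temp = L[i]
--         elif L[i] < 0 and L[i] > temp:
--             temp = L[i]
--     return temp
-- ===== SOURCE B (Python) =====
-- def timGiaTriAmLonNhat(L):
--     negs = [x for x in L if x < 0]
--     return max(negs) if negs else 0
-- ===== Notes on version B (the rewrite author's own statement) =====
-- stated objective: simpler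
-- what changed: Replaces A's single loop with a zero-sentinel running max (two state-dependent branches) by a filter of the strictly-negative elements followed by the builtin max, with 0 for the empty case.
import Mathlib
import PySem

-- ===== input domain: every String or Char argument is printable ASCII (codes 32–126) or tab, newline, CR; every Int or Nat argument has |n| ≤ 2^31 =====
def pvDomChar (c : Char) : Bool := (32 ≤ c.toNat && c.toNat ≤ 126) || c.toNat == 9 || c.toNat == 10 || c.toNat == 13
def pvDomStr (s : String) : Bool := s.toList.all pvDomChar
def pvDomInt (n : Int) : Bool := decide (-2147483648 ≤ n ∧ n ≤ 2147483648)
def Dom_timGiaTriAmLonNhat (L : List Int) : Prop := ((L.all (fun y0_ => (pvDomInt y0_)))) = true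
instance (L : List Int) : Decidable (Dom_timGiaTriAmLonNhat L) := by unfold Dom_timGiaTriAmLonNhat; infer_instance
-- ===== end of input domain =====

-- B replaces A's zero-sentinel running-max loop by filtering the negatives and taking the builtin max (simpler decomposition).

-- ===== PORT A =====
def timGiaTriAmLonNhat (L : List Int) : Int :=
  (PySem.List.pyRange 0 (L.length : Int) 1).foldl
    (fun temp i =>
      let x := PySem.List.pyGetD L i 0
      if temp = 0 then (if x < temp then x else temp)
      else if x < 0 ∧ x > temp then x else temp) 0

-- ===== PORT B =====
def timGiaTriAmLonNhat_alt (L : List Int) : Int :=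
  let negs := L.filter (fun x => decide (x < 0))
  match PySem.List.max? negs (fun y => y) with
  | some m => m
  | none => 0

-- ===== PRECONDITION & SPEC =====
def Spec_timGiaTriAmLonNhat (L : List Int) (out : Int) : Prop := out = timGiaTriAmLonNhat_alt L
instance (L : List Int) (out : Int) : Decidable (Spec_timGiaTriAmLonNhat L out) := by unfold Spec_timGiaTriAmLonNhat; infer_instance

-- ===== CLAIM (what is proved, stated in full; the proofs are below) =====
def Claim_equal_timGiaTriAmLonNhat : Prop := ∀ (L : List Int), Dom_timGiaTriAmLonNhat L → Spec_timGiaTriAmLonNhat L (timGiaTriAmLonNhat L)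

-- ===== LEMMAS AND PROOFS =====

def pvStep (temp x : Int) : Int :=
  if temp = 0 then (if x < temp then x else temp)
  else if x < 0 ∧ x > temp then x else temp

lemma pvStep_neg (t x : Int) (ht : t < 0) :
    pvStep t x = if x < 0 then max t x else t := by
  unfold pvStep
  split_ifs with h1 h2 h3 h4 h5 <;> omega

lemma pv_foldl_neg (l : List Int) (t : Int) (ht : t < 0) :
    l.foldl pvStep t = (l.filter (fun x => decide (x < 0))).foldl max t := by
  induction l generalizing t with
  | nil => rfl
  | cons x l ih =>
    by_cases hx : x < 0
    · simp only [List.foldl_cons, List.filter_cons, hx, decide_true, pvStep_neg _ _ ht]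
      exact ih (max t x) (by omega)
    · simp only [List.foldl_cons, List.filter_cons, hx, decide_false, pvStep_neg _ _ ht]
      exact ih t ht

lemma pv_foldl_zero (l : List Int) :
    l.foldl pvStep 0 = timGiaTriAmLonNhat_alt l := by
  induction l with
  | nil => rfl
  | cons x l ih =>
    by_cases hx : x < 0
    · have hs : pvStep 0 x = x := by unfold pvStep; simp [hx]
      simp only [timGiaTriAmLonNhat_alt, List.foldl_cons, hs, List.filter_cons, hx, decide_true,
        if_pos trivial, PySem.List.max?_id_cons]
      exact pv_foldl_neg l x hx
    · have hs : pvStep 0 x = 0 := by unfold pvStep; simp [hx]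
      simp [List.foldl_cons, hs, ih, timGiaTriAmLonNhat_alt, hx]

-- ===== VERDICT (by name: the statement is the Claim_ definition above) =====
theorem timGiaTriAmLonNhat_spec : Claim_equal_timGiaTriAmLonNhat := by
  intro L _
  show timGiaTriAmLonNhat L = timGiaTriAmLonNhat_alt L
  have h : timGiaTriAmLonNhat L =
      (PySem.List.pyRange ((0 : Nat) : Int) (PySem.List.len L)).foldl
        (fun acc j => pvStep acc (PySem.List.pyGetD L j 0)) 0 := rfl
  rw [h, PySem.List.foldl_pyRange_pyGetD (xs := L) (f := pvStep) (d := 0) (init := 0) (a := ((0 : Nat) : Int)) (by omega)]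
  simpa using pv_foldl_zero L
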